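-- pv_equiv track=rewrite | github.com/Theanonymous-hub/Google_tech_dev_Codingchallenges | Datastructures_and_Algorithms/Day12/QHeap.py | heap_operations
-- ===== SOURCE A (Python) =====
-- import heapq
--
-- class MinHeap:
--     def __init__(self):
--         self.heap = []
--         self.deleted = set()
--
--     def insert(self, value):
--         heapq.heappush(self.heap, value)
--
--     def delete(self, value):
--         self.deleted.add(value)
--
--     def get_min(self):
--         while self.heap[0] in self.deleted:
--             heapq.heappop(self.heap)
--         return self.heap[0]
--
-- def heap_operations(queries):
--     min_heap = MinHeap()
--     result = []
--
--     for query in queries: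
--         query_type = query[0]
--
--         if query_type == 1:
--             element = query[1]
--             min_heap.insert(element)
--         elif query_type == 2:
--             element = query[1]
--             min_heap.delete(element)
--         elif query_type == 3:
--             result.append(min_heap.get_min())
--
--     return result
-- ===== SOURCE B (Python) =====
-- def heap_operations(queries):
--     values = []
--     deleted = set()
--     result = []
--     for query in queries:
--         query_type = query[0]
--         if query_type == 1:
--             values.append(query[1])
--         elif query_type == 2:
--             deleted.add(query[1])
--         elif query_type == 3:
--             candidates = [v for v in values if v not in deleted]
--             result.append(sorted(candidates)[0])
--     return result
-- ===== Notes on version B (the rewrite author's own statement) =====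
-- stated objective: simpler
-- what changed: B drops the lazy-deletion binary heap entirely: it keeps a plain list of inserted values and a deleted set, and answers each get-min query by filtering out deleted values and taking the first element of the sorted remainder.
import Mathlib
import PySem

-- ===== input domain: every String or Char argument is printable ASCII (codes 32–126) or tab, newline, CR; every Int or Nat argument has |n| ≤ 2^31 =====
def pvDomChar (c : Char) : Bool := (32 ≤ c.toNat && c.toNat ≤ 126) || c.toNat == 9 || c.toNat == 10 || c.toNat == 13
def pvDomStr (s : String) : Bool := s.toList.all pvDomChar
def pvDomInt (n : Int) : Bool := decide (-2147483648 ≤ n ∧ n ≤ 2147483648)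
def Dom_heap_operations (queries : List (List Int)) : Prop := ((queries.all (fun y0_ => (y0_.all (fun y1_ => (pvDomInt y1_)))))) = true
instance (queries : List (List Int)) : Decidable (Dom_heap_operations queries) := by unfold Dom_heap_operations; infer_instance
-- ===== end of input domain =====

-- B replaces A's lazy-deletion binary heap (heapq) by a plain list of inserted values plus the
-- deleted set, recomputing each minimum by filter + sort; equivalence is about the return value.

-- ===== PORT A =====
-- heapq._siftdown(heap, startpos, pos); newitem = heap[pos] at call time is passed explicitly
def pvSiftdown (heap : List Int) (startpos pos : Nat) (newitem : Int) : List Int :=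
  if _h : startpos < pos then
    let parentpos := (pos - 1) / 2
    let parent := heap.getD parentpos 0
    if newitem < parent then
      pvSiftdown (heap.set pos parent) startpos parentpos newitem
    else
      heap.set pos newitem
  else
    heap.set pos newitem
termination_by pos
decreasing_by omega

-- heapq.heappush
def pvHeappush (heap : List Int) (item : Int) : List Int :=
  let h := heap ++ [item]
  pvSiftdown h 0 (h.length - 1) (h.getD (h.length - 1) 0)

-- the while-loop of heapq._siftup (move the smaller child up until a leaf is reached)
def pvSiftupLoop (heap : List Int) (pos childpos endpos : Nat) : List Int × Nat :=
  if _h : childpos < endpos then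
    let childpos' := if childpos + 1 < endpos ∧ ¬ (heap.getD childpos 0 < heap.getD (childpos + 1) 0)
                     then childpos + 1 else childpos
    pvSiftupLoop (heap.set pos (heap.getD childpos' 0)) childpos' (2 * childpos' + 1) endpos
  else
    (heap, pos)
termination_by endpos - childpos
decreasing_by split <;> omega

-- heapq._siftup
def pvSiftup (heap : List Int) (pos : Nat) : List Int :=
  let newitem := heap.getD pos 0
  let r := pvSiftupLoop heap pos (2 * pos + 1) heap.length
  pvSiftdown (r.1.set r.2 newitem) pos r.2 newitem

-- heapq.heappop; on [] Python raises IndexError (excluded by Pre_), we return a junk pair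
def pvHeappop (heap : List Int) : Int × List Int :=
  match heap with
  | [] => (0, [])
  | _ :: _ =>
    let lastelt := heap.getD (heap.length - 1) 0
    let rest := heap.dropLast
    if rest.isEmpty then (lastelt, rest)
    else (rest.getD 0 0, pvSiftup (rest.set 0 lastelt) 0)

-- MinHeap.get_min: while heap[0] in deleted: heappop.  Fuel = current heap length suffices; on an
-- all-deleted/empty heap Python raises IndexError (excluded by Pre_), we return a junk pair
def pvGetMinLoop : Nat → List Int → PySem.Set Int → Int × List Int
  | 0, heap, _ => (heap.getD 0 0, heap)
  | fuel + 1, heap, del =>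
    match heap with
    | [] => (0, [])
    | _ :: _ =>
      if heap.getD 0 0 ∈ del then pvGetMinLoop fuel (pvHeappop heap).2 del
      else (heap.getD 0 0, heap)

-- the main query loop of A
def pvHeapGo : List (List Int) → List Int → PySem.Set Int → List Int → List Int
  | [], _, _, res => res
  | q :: qs, heap, del, res =>
    if q.getD 0 0 = 1 then pvHeapGo qs (pvHeappush heap (q.getD 1 0)) del res
    else if q.getD 0 0 = 2 then pvHeapGo qs heap (PySem.Set.add del (q.getD 1 0)) res
    else if q.getD 0 0 = 3 then
      pvHeapGo qs (pvGetMinLoop heap.length heap del).2 del (res ++ [(pvGetMinLoop heap.length heap del).1])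
    else pvHeapGo qs heap del res

def heap_operations (queries : List (List Int)) : List Int :=
  pvHeapGo queries [] PySem.Set.empty []

-- ===== PORT B =====
def pvAltGo : List (List Int) → List Int → PySem.Set Int → List Int → List Int
  | [], _, _, res => res
  | q :: qs, values, del, res =>
    if q.getD 0 0 = 1 then pvAltGo qs (values ++ [q.getD 1 0]) del res
    else if q.getD 0 0 = 2 then pvAltGo qs values (PySem.Set.add del (q.getD 1 0)) res
    else if q.getD 0 0 = 3 then
      pvAltGo qs values del
        (res ++ [(PySem.List.sorted (values.filter (fun v => !(PySem.Set.contains del v)))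
                    (fun v => v) false).getD 0 0])
    else pvAltGo qs values del res

def heap_operations_alt (queries : List (List Int)) : List Int :=
  pvAltGo queries [] PySem.Set.empty []

-- ===== PRECONDITION & SPEC =====
-- Pre_ excludes exactly the inputs on which A raises: an empty query (query[0] → IndexError), an
-- insert/delete query with no second entry (query[1] → IndexError), and a get-min query issued when
-- every value inserted so far has already been deleted (self.heap[0] → IndexError).  pvPreQ walks the
-- queries once tracking which values are inserted/deleted so far — the minimal state needed to say
-- "each get-min sees a live element"; it does not re-run either algorithm.
def pvPreQ : List (List Int) → List Int → List Int → Bool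
  | [], _, _ => true
  | q :: qs, ins, del =>
    !q.isEmpty &&
    (if q.getD 0 0 = 1 then decide (2 ≤ q.length) && pvPreQ qs (ins ++ [q.getD 1 0]) del
     else if q.getD 0 0 = 2 then decide (2 ≤ q.length) && pvPreQ qs ins (del ++ [q.getD 1 0])
     else if q.getD 0 0 = 3 then ins.any (fun v => !(del.contains v)) && pvPreQ qs ins del
     else pvPreQ qs ins del)

def Pre_heap_operations (queries : List (List Int)) : Prop := pvPreQ queries [] [] = true
instance (queries : List (List Int)) : Decidable (Pre_heap_operations queries) := by
  unfold Pre_heap_operations; infer_instance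

def pvWitness_heap_operations : List (List Int) := [[1, 5], [1, 3], [3], [2, 3], [3], [0]]

def Spec_heap_operations (queries : List (List Int)) (out : List Int) : Prop := out = heap_operations_alt queries
instance (queries : List (List Int)) (out : List Int) : Decidable (Spec_heap_operations queries out) := by unfold Spec_heap_operations; infer_instance

-- ===== CLAIM (what is proved, stated in full; the proofs are below) =====
def Claim_equal_heap_operations : Prop := ∀ (queries : List (List Int)), Dom_heap_operations queries → Pre_heap_operations queries → Spec_heap_operations queries (heap_operations queries)

-- ===== LEMMAS AND PROOFS =====

-- "l is a binary min-heap" for heapq's array encoding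
def PvHeapOrd (l : List Int) : Prop :=
  ∀ i : Nat, i < l.length → 1 ≤ i → l.getD ((i - 1) / 2) 0 ≤ l.getD i 0

theorem pv_getD_set (l : List Int) (i j : Nat) (a : Int) (hj : j < l.length) :
    (l.set i a).getD j 0 = if i = j then a else l.getD j 0 := by
  rw [List.getD_eq_getElem l 0 hj, List.getD_eq_getElem _ 0 (by simpa using hj)]
  rw [List.getElem_set]

theorem pv_set_getD_self (l : List Int) (i : Nat) (hi : i < l.length) :
    l.set i (l.getD i 0) = l := by
  rw [List.getD_eq_getElem l 0 hi]
  exact List.set_getElem_self ..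

theorem pv_perm_cons_set : ∀ (l : List Int) (k : Nat) (a b : Int), k < l.length →
    (a :: l.set k b).Perm (b :: l.set k a)
  | y :: ys, 0, a, b, _ => by simpa using List.Perm.swap b a ys
  | y :: ys, k + 1, a, b, hk => by
    simp only [List.set_cons_succ]
    exact ((List.Perm.swap y a _).trans
      (List.Perm.cons y (pv_perm_cons_set ys k a b (by simpa using hk)))).trans
      (List.Perm.swap b y _)

theorem pv_perm_set_set : ∀ (l : List Int) (i j : Nat) (a b : Int),
    i < l.length → j < l.length → i ≠ j →
    ((l.set i a).set j b).Perm ((l.set i b).set j a)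
  | [], i, j, a, b, hi, _, _ => by simp at hi
  | x :: xs, 0, 0, a, b, _, _, hij => absurd rfl hij
  | x :: xs, 0, k + 1, a, b, _, hj, _ => by
    simpa using pv_perm_cons_set xs k a b (by simpa using hj)
  | x :: xs, m + 1, 0, a, b, hi, _, _ => by
    simpa using pv_perm_cons_set xs m b a (by simpa using hi)
  | x :: xs, m + 1, k + 1, a, b, hi, hj, hij => by
    simp only [List.set_cons_succ]
    exact List.Perm.cons x (pv_perm_set_set xs m k a b (by simpa using hi) (by simpa using hj)
      (by omega))

theorem pv_siftdown_base (heap : List Int) (pos : Nat) (newitem : Int)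
    (_hpos : pos < heap.length)
    (ha : ∀ i : Nat, i < heap.length → 1 ≤ i → i ≠ pos →
      heap.getD ((i - 1) / 2) 0 ≤ heap.getD i 0)
    (hb : ∀ i : Nat, i < heap.length → 1 ≤ i → (i - 1) / 2 = pos →
      newitem ≤ heap.getD i 0 ∧ (0 < pos → heap.getD ((pos - 1) / 2) 0 ≤ heap.getD i 0))
    (hstop : pos = 0 ∨ heap.getD ((pos - 1) / 2) 0 ≤ newitem) :
    PvHeapOrd (heap.set pos newitem) := by
  intro i hi h1
  have hi' : i < heap.length := by simpa using hi
  have hpar : (i - 1) / 2 < heap.length := lt_of_le_of_lt (by omega) hi'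
  rw [pv_getD_set _ _ _ _ hi', pv_getD_set _ _ _ _ hpar]
  by_cases hip : pos = i
  · subst hip
    rw [if_pos rfl, if_neg (by omega)]
    rcases hstop with h | h
    · omega
    · exact h
  · rw [if_neg hip]
    by_cases hpi : pos = (i - 1) / 2
    · rw [if_pos hpi]
      exact (hb i hi' h1 hpi.symm).1
    · rw [if_neg hpi]
      exact ha i hi' h1 (fun h => hip h.symm)

theorem pv_siftdown_spec (pos : Nat) (heap : List Int) (newitem : Int)
    (hpos : pos < heap.length)
    (ha : ∀ i : Nat, i < heap.length → 1 ≤ i → i ≠ pos →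
      heap.getD ((i - 1) / 2) 0 ≤ heap.getD i 0)
    (hb : ∀ i : Nat, i < heap.length → 1 ≤ i → (i - 1) / 2 = pos →
      newitem ≤ heap.getD i 0 ∧ (0 < pos → heap.getD ((pos - 1) / 2) 0 ≤ heap.getD i 0)) :
    PvHeapOrd (pvSiftdown heap 0 pos newitem) ∧
      (pvSiftdown heap 0 pos newitem).Perm (heap.set pos newitem) ∧
      (pvSiftdown heap 0 pos newitem).length = heap.length := by
  induction pos using Nat.strong_induction_on generalizing heap with
  | _ pos IH =>
  rw [pvSiftdown]
  by_cases h0 : 0 < pos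
  · rw [dif_pos h0]
    dsimp only
    by_cases hlt : newitem < heap.getD ((pos - 1) / 2) 0
    · rw [if_pos hlt]
      set pp := (pos - 1) / 2 with hpp
      have hppos : pp < pos := by omega
      have hplen : pp < heap.length := lt_trans hppos hpos
      have hlen' : (heap.set pos (heap.getD pp 0)).length = heap.length := by simp
      have hgd : ∀ j : Nat, j < heap.length → j ≠ pos →
          (heap.set pos (heap.getD pp 0)).getD j 0 = heap.getD j 0 := by
        intro j hj hjne
        rw [pv_getD_set _ _ _ _ hj, if_neg (fun h => hjne h.symm)]
      have hgdp : (heap.set pos (heap.getD pp 0)).getD pos 0 = heap.getD pp 0 := by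
        rw [pv_getD_set _ _ _ _ hpos, if_pos rfl]
      obtain ⟨O1, O2, O3⟩ := IH pp hppos (heap.set pos (heap.getD pp 0))
        (by rw [hlen']; exact hplen)
        (by
          intro i hi h1 hine
          rw [hlen'] at hi
          have hpar : (i - 1) / 2 < heap.length := lt_of_le_of_lt (by omega) hi
          by_cases hip : i = pos
          · subst hip
            rw [hgdp]
            have : (i - 1) / 2 = pp := hpp.symm
            rw [this, hgd pp hplen (by omega)]
          · rw [hgd i hi hip]
            by_cases hpar_pos : (i - 1) / 2 = pos
            · rw [hpar_pos, hgdp]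
              exact (hb i hi h1 hpar_pos).2 h0
            · rw [hgd _ hpar hpar_pos]
              exact ha i hi h1 hip)
        (by
          intro i hi h1 hipar
          rw [hlen'] at hi
          have hgp : (pp - 1) / 2 < heap.length := lt_of_le_of_lt (by omega) hplen
          have hgp_ne : (pp - 1) / 2 ≠ pos := by omega
          have hppv : 1 ≤ pp → heap.getD ((pp - 1) / 2) 0 ≤ heap.getD pp 0 := fun h1p =>
            ha pp hplen h1p (by omega)
          by_cases hip : i = pos
          · subst hip
            rw [hgdp, hgd _ hgp hgp_ne]
            exact ⟨le_of_lt hlt, fun hpp0 => hppv (by omega)⟩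
          · rw [hgd i hi hip, hgd _ hgp hgp_ne]
            have hle : heap.getD pp 0 ≤ heap.getD i 0 := by
              have := ha i hi h1 hip
              rwa [hipar] at this
            exact ⟨le_trans (le_of_lt hlt) hle, fun hpp0 => le_trans (hppv (by omega)) hle⟩)
      refine ⟨O1, ?_, by rw [O3, hlen']⟩
      have step : ((heap.set pos (heap.getD pp 0)).set pp newitem).Perm (heap.set pos newitem) := by
        refine ((pv_perm_set_set heap pos pp (heap.getD pp 0) newitem hpos hplen (by omega)).trans ?_)
        have : (heap.set pos newitem).getD pp 0 = heap.getD pp 0 := by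
          rw [pv_getD_set _ _ _ _ hplen, if_neg (by omega)]
        rw [← this]
        rw [pv_set_getD_self _ _ (by simpa using hplen)]
      exact O2.trans step
    · rw [if_neg hlt]
      exact ⟨pv_siftdown_base heap pos newitem hpos ha hb (Or.inr (by omega)), List.Perm.refl _,
        by simp⟩
  · rw [dif_neg h0]
    exact ⟨pv_siftdown_base heap pos newitem hpos ha hb (Or.inl (by omega)), List.Perm.refl _,
      by simp⟩

theorem pv_heappush_spec (heap : List Int) (x : Int) (h : PvHeapOrd heap) :
    PvHeapOrd (pvHeappush heap x) ∧ (pvHeappush heap x).Perm (x :: heap) := by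
  unfold pvHeappush
  dsimp only
  have hlen : (heap ++ [x]).length = heap.length + 1 := by simp
  have hn : (heap ++ [x]).length - 1 = heap.length := by simp
  rw [hn]
  have hget : (heap ++ [x]).getD heap.length 0 = x := by
    rw [List.getD_eq_getElem _ 0 (by simp)]
    exact List.getElem_concat_length rfl (by simp)
  rw [hget]
  obtain ⟨O1, O2, _⟩ := pv_siftdown_spec heap.length (heap ++ [x]) x (by simp)
    (by
      intro i hi h1 hine
      rw [hlen] at hi
      have hi' : i < heap.length := by omega
      rw [List.getD_append _ _ 0 _ (by omega), List.getD_append _ _ 0 _ (by omega)]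
      exact h i hi' h1)
    (by intro i hi h1 hipar; rw [hlen] at hi; omega)
  refine ⟨O1, O2.trans ?_⟩
  have hset : (heap ++ [x]).set heap.length x = heap ++ [x] := by
    nth_rewrite 2 [← hget]
    exact pv_set_getD_self _ _ (by simp)
  rw [hset]
  exact List.perm_append_singleton x heap

theorem pv_siftupLoop_spec : ∀ (n : Nat) (heap : List Int) (pos childpos : Nat),
    heap.length ≤ childpos + n →
    childpos = 2 * pos + 1 → pos < heap.length →
    (∀ i : Nat, i < heap.length → 1 ≤ i → (i - 1) / 2 ≠ pos →
      heap.getD ((i - 1) / 2) 0 ≤ heap.getD i 0) →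
    (∀ i : Nat, i < heap.length → (i - 1) / 2 = pos → 0 < pos →
      heap.getD ((pos - 1) / 2) 0 ≤ heap.getD i 0) →
    (pvSiftupLoop heap pos childpos heap.length).1.length = heap.length ∧
      (pvSiftupLoop heap pos childpos heap.length).2 < heap.length ∧
      heap.length ≤ 2 * (pvSiftupLoop heap pos childpos heap.length).2 + 1 ∧
      (∀ i : Nat, i < heap.length → 1 ≤ i → i ≠ (pvSiftupLoop heap pos childpos heap.length).2 →
        (pvSiftupLoop heap pos childpos heap.length).1.getD ((i - 1) / 2) 0 ≤
          (pvSiftupLoop heap pos childpos heap.length).1.getD i 0) ∧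
      (∀ x : Int, ((pvSiftupLoop heap pos childpos heap.length).1.set
          (pvSiftupLoop heap pos childpos heap.length).2 x).Perm (heap.set pos x)) := by
  intro n
  induction n with
  | zero =>
    intro heap pos childpos hn hc hpos hq hq2
    rw [pvSiftupLoop, dif_neg (by omega)]
    refine ⟨rfl, hpos, by omega, ?_, fun x => List.Perm.refl _⟩
    intro i hi h1 hine
    by_cases hp : (i - 1) / 2 = pos
    · omega
    · exact hq i hi h1 hp
  | succ m IH =>
    intro heap pos childpos hn hc hpos hq hq2
    rw [pvSiftupLoop]
    by_cases hcl : childpos < heap.length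
    · rw [dif_pos hcl]
      dsimp only
      set c := if childpos + 1 < heap.length ∧ ¬(heap.getD childpos 0 < heap.getD (childpos + 1) 0)
               then childpos + 1 else childpos with hcdef
      have hcc : childpos ≤ c ∧ c ≤ childpos + 1 := by
        rw [hcdef]; split <;> omega
      have hclen : c < heap.length := by
        rw [hcdef]; split <;> omega
      have hcpar : (c - 1) / 2 = pos := by omega
      have hposc : pos < childpos := by omega
      have hmin : ∀ j : Nat, j < heap.length → 1 ≤ j → (j - 1) / 2 = pos →
          heap.getD c 0 ≤ heap.getD j 0 := by
        intro j hj hj1 hjp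
        have hj12 : j = childpos ∨ j = childpos + 1 := by omega
        rw [hcdef]
        split
        · rename_i hcond
          rcases hj12 with rfl | rfl
          · omega
          · exact le_refl _
        · rename_i hcond
          rcases hj12 with rfl | rfl
          · exact le_refl _
          · rw [Classical.not_and_iff_not_or_not, not_lt, not_not] at hcond
            rcases hcond with h | h
            · omega
            · exact le_of_lt h
      set heap' := heap.set pos (heap.getD c 0) with hh'
      have hlen' : heap'.length = heap.length := by simp [hh']
      have hgd : ∀ j : Nat, j < heap.length → j ≠ pos → heap'.getD j 0 = heap.getD j 0 := by
        intro j hj hjne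
        rw [hh', pv_getD_set _ _ _ _ hj, if_neg (fun h => hjne h.symm)]
      have hgdp : heap'.getD pos 0 = heap.getD c 0 := by
        rw [hh', pv_getD_set _ _ _ _ hpos, if_pos rfl]
      have IH' := IH heap' c (2 * c + 1) (by rw [hlen']; omega) rfl (by rw [hlen']; omega)
        (by
          intro i hi h1 hne
          rw [hlen'] at hi
          have hpar : (i - 1) / 2 < heap.length := lt_of_le_of_lt (by omega) hi
          by_cases hip : i = pos
          · subst hip
            rw [hgdp, hgd _ hpar (by omega)]
            exact hq2 c hclen hcpar (by omega)
          · rw [hgd i hi hip]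
            by_cases hp : (i - 1) / 2 = pos
            · rw [hp, hgdp]
              exact hmin i hi h1 hp
            · rw [hgd _ hpar hp]
              exact hq i hi h1 hp)
        (by
          intro i hi hic hc0
          rw [hlen'] at hi
          have hine : i ≠ pos := by omega
          have h2 := hq i hi (by omega) (by omega)
          rw [hic] at h2
          rw [hgd i hi hine, hcpar, hgdp]
          exact h2)
      rw [hlen'] at IH'
      obtain ⟨L, P2, P3, E, Pm⟩ := IH'
      refine ⟨L, P2, P3, E, ?_⟩
      intro x
      refine (Pm x).trans ?_
      rw [hh']
      refine (pv_perm_set_set heap pos c (heap.getD c 0) x hpos hclen (by omega)).trans ?_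
      have hcv : (heap.set pos x).getD c 0 = heap.getD c 0 := by
        rw [pv_getD_set _ _ _ _ hclen, if_neg (by omega)]
      rw [← hcv, pv_set_getD_self _ _ (by simpa using hclen)]
    · rw [dif_neg hcl]
      refine ⟨rfl, hpos, by omega, ?_, fun x => List.Perm.refl _⟩
      intro i hi h1 hine
      by_cases hp : (i - 1) / 2 = pos
      · omega
      · exact hq i hi h1 hp

theorem pv_siftup_spec (heap : List Int) (h0 : 0 < heap.length)
    (hq : ∀ i : Nat, i < heap.length → 1 ≤ i → (i - 1) / 2 ≠ 0 →
      heap.getD ((i - 1) / 2) 0 ≤ heap.getD i 0) :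
    PvHeapOrd (pvSiftup heap 0) ∧ (pvSiftup heap 0).Perm heap := by
  unfold pvSiftup
  dsimp only
  obtain ⟨L, P2, P3, E, Pm⟩ := pv_siftupLoop_spec heap.length heap 0 (2 * 0 + 1)
    (by omega) rfl h0 hq (by intro i _ _ h; omega)
  set r := pvSiftupLoop heap 0 (2 * 0 + 1) heap.length with hr
  set ni := heap.getD 0 0 with hni
  have hlen2 : (r.1.set r.2 ni).length = heap.length := by simp [L]
  obtain ⟨O1, O2, _⟩ := pv_siftdown_spec r.2 (r.1.set r.2 ni) ni (by rw [hlen2]; exact P2)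
    (by
      intro i hi h1 hine
      rw [hlen2] at hi
      have hpar : (i - 1) / 2 < heap.length := lt_of_le_of_lt (by omega) hi
      have hparne : (i - 1) / 2 ≠ r.2 := by omega
      rw [pv_getD_set _ _ _ _ (by rw [L]; exact hpar), if_neg (fun h => hparne h.symm),
        pv_getD_set _ _ _ _ (by rw [L]; exact hi), if_neg (fun h => hine h.symm)]
      exact E i hi h1 hine)
    (by intro i hi _ hipar; rw [hlen2] at hi; omega)
  refine ⟨O1, O2.trans ?_⟩
  rw [List.set_set]
  refine (Pm ni).trans ?_
  rw [hni, pv_set_getD_self _ _ h0]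

theorem pv_heappop_spec (heap : List Int) (hne : heap ≠ []) (h : PvHeapOrd heap) :
    (pvHeappop heap).1 = heap.getD 0 0 ∧ PvHeapOrd (pvHeappop heap).2 ∧
      ((pvHeappop heap).1 :: (pvHeappop heap).2).Perm heap := by
  match heap with
  | [] => exact absurd rfl hne
  | x :: t =>
    rw [pvHeappop]
    by_cases hemp : (x :: t).dropLast.isEmpty
    · rw [if_pos hemp]
      have ht : t = [] := by
        cases t with
        | nil => rfl
        | cons z t' => simp at hemp
      subst ht
      refine ⟨rfl, ?_, by simp⟩
      intro i hi h1
      simp at hi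
    · rw [if_neg hemp]
      set hp := x :: t with hhp
      have hlenpos : 0 < hp.length := by simp [hhp]
      have hrest_ne : hp.dropLast ≠ [] := by
        intro hh; rw [hh] at hemp; exact hemp rfl
      have hrlen : hp.dropLast.length = hp.length - 1 := List.length_dropLast
      have hrpos : 0 < hp.dropLast.length := List.length_pos_iff.mpr hrest_ne
      set lastelt := hp.getD (hp.length - 1) 0 with hlast
      set l2 := hp.dropLast.set 0 lastelt with hl2
      have hl2len : l2.length = hp.length - 1 := by simp [hl2, hrlen]
      have hdrop_getD : ∀ j : Nat, j < hp.dropLast.length →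
          hp.dropLast.getD j 0 = hp.getD j 0 := by
        intro j hj
        rw [List.getD_eq_getElem _ 0 hj, List.getD_eq_getElem _ 0 (by omega),
          List.getElem_dropLast]
      obtain ⟨O1, O2⟩ := pv_siftup_spec l2 (by omega)
        (by
          intro i hi h1 hipar
          rw [hl2len] at hi
          have hpar : (i - 1) / 2 < hp.length - 1 := lt_of_le_of_lt (by omega) hi
          rw [hl2, pv_getD_set _ _ _ _ (by omega), if_neg (by omega),
            pv_getD_set _ _ _ _ (by omega), if_neg (by omega),
            hdrop_getD i (by omega), hdrop_getD _ (by omega)]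
          exact h i (by omega) h1)
      refine ⟨?_, O1, ?_⟩
      · exact hdrop_getD 0 hrpos
      · rw [hdrop_getD 0 hrpos]
        refine (List.Perm.cons _ O2).trans ?_
        -- hp.getD 0 0 :: l2  ~  hp
        obtain ⟨r', hr'⟩ : ∃ r', hp.dropLast = hp.getD 0 0 :: r' := by
          match hd : hp.dropLast, hrest_ne with
          | y :: r', _ =>
            refine ⟨r', ?_⟩
            have : hp.dropLast.getD 0 0 = y := by rw [hd]; rfl
            rw [hdrop_getD 0 hrpos] at this
            rw [← this]
        rw [hl2, hr', List.set_cons_zero]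
        have hsplit : hp.dropLast ++ [lastelt] = hp := by
          have h1 : lastelt = hp.getLast (by simp [hhp]) := by
            rw [hlast, List.getLast_eq_getElem, List.getD_eq_getElem _ 0 (by omega)]
          rw [h1]
          exact List.dropLast_concat_getLast _
        have step1 : (hp.getD 0 0 :: lastelt :: r').Perm (lastelt :: hp.dropLast) := by
          rw [hr']
          exact List.Perm.swap _ _ _
        have step2 : (lastelt :: hp.dropLast).Perm hp := by
          nth_rewrite 2 [← hsplit]
          exact (List.perm_append_singleton _ _).symm
        exact step1.trans step2

theorem pv_root_min_idx (heap : List Int) (h : PvHeapOrd heap) :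
    ∀ i : Nat, i < heap.length → heap.getD 0 0 ≤ heap.getD i 0 := by
  intro i
  induction i using Nat.strong_induction_on with
  | _ i IH =>
    intro hi
    by_cases h0 : i = 0
    · subst h0; exact le_refl _
    · exact le_trans (IH ((i - 1) / 2) (by omega) (by omega)) (h i hi (by omega))

theorem pv_root_min (heap : List Int) (h : PvHeapOrd heap) :
    ∀ x ∈ heap, heap.getD 0 0 ≤ x := by
  intro x hx
  obtain ⟨i, hi, rfl⟩ := List.mem_iff_getElem.mp hx
  rw [← List.getD_eq_getElem heap 0 hi]
  exact pv_root_min_idx heap h i hi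

theorem pv_getMinLoop_spec : ∀ (fuel : Nat) (heap : List Int) (del : PySem.Set Int),
    heap.length ≤ fuel → PvHeapOrd heap → (∃ v ∈ heap, v ∉ del) →
    (pvGetMinLoop fuel heap del).1 ∈ heap ∧ (pvGetMinLoop fuel heap del).1 ∉ del ∧
      (∀ x ∈ heap, x ∉ del → (pvGetMinLoop fuel heap del).1 ≤ x) ∧
      PvHeapOrd (pvGetMinLoop fuel heap del).2 ∧
      ∃ pp : List Int, ((pvGetMinLoop fuel heap del).2 ++ pp).Perm heap ∧ ∀ x ∈ pp, x ∈ del := by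
  intro fuel
  induction fuel with
  | zero =>
    intro heap del hfuel _ hlive
    obtain ⟨v, hv, _⟩ := hlive
    have hnil : heap = [] := List.length_eq_zero_iff.mp (by omega)
    rw [hnil] at hv
    simp at hv
  | succ m IH =>
    intro heap del hfuel hord hlive
    match heap with
    | [] => obtain ⟨v, hv, _⟩ := hlive; simp at hv
    | x :: t =>
      set hp := x :: t with hhp
      rw [pvGetMinLoop]
      by_cases hin : hp.getD 0 0 ∈ del
      · rw [if_pos hin]
        obtain ⟨E1, E2, E3⟩ := pv_heappop_spec hp (by simp [hhp]) hord
        have hlen2 : (pvHeappop hp).2.length = hp.length - 1 := by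
          have := E3.length_eq
          simp at this
          omega
        obtain ⟨v, hv, hvd⟩ := hlive
        have hvne : v ≠ (pvHeappop hp).1 := by rw [E1]; intro hh; rw [hh] at hvd; exact hvd hin
        have hv2 : v ∈ (pvHeappop hp).2 := by
          have := E3.mem_iff.mpr hv
          simp at this
          tauto
        obtain ⟨I1, I2, I3, I4, pp, I5, I6⟩ := IH (pvHeappop hp).2 del (by
            have : 0 < hp.length := by simp [hhp]
            omega) E2 ⟨v, hv2, hvd⟩
        have hmem2 : ∀ y, y ∈ (pvHeappop hp).2 → y ∈ hp := fun y hy =>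
          E3.mem_iff.mp (List.mem_cons_of_mem _ hy)
        refine ⟨hmem2 _ I1, I2, ?_, I4, pp ++ [(pvHeappop hp).1], ?_, ?_⟩
        · intro y hy hyd
          have : y ∈ (pvHeappop hp).1 :: (pvHeappop hp).2 := E3.mem_iff.mpr hy
          rcases List.mem_cons.mp this with hh | hh
          · exfalso; rw [hh, E1] at hyd; exact hyd hin
          · exact I3 y hh hyd
        · have e1 : (pvGetMinLoop m (pvHeappop hp).2 del).2 ++ (pp ++ [(pvHeappop hp).1])
              = ((pvGetMinLoop m (pvHeappop hp).2 del).2 ++ pp) ++ [(pvHeappop hp).1] := by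
            rw [List.append_assoc]
          rw [e1]
          exact ((I5.append_right _).trans (List.perm_append_singleton _ _)).trans E3
        · intro y hy
          rcases List.mem_append.mp hy with hh | hh
          · exact I6 y hh
          · rw [List.mem_singleton.mp hh, E1]; exact hin
      · rw [if_neg hin]
        refine ⟨?_, hin, fun y hy _ => pv_root_min hp hord y hy, hord, [], by simp [hhp], by simp⟩
        rw [hhp]
        exact List.mem_cons_self
theorem pv_go_eq (qs : List (List Int)) :
    ∀ (heap values : List Int) (del : PySem.Set Int) (delL : List Int)
      (popped res : List Int),
      PvHeapOrd heap → (heap ++ popped).Perm values → (∀ x ∈ popped, x ∈ del) →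
      (∀ x : Int, x ∈ delL ↔ x ∈ del) → pvPreQ qs values delL = true →
      pvHeapGo qs heap del res = pvAltGo qs values del res := by
  induction qs with
  | nil => intro heap values del delL popped res _ _ _ _ _; rfl
  | cons q qs IH =>
    intro heap values del delL popped res hord hperm hpop hdel hpre
    rw [pvPreQ, Bool.and_eq_true] at hpre
    obtain ⟨-, hpre⟩ := hpre
    rw [pvHeapGo, pvAltGo]
    by_cases h1 : q.getD 0 0 = 1
    · rw [if_pos h1, if_pos h1]
      rw [if_pos h1, Bool.and_eq_true] at hpre
      obtain ⟨-, hpre⟩ := hpre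
      obtain ⟨P1, P2⟩ := pv_heappush_spec heap (q.getD 1 0) hord
      refine IH _ _ _ delL popped res P1 ?_ hpop hdel hpre
      exact (P2.append_right popped).trans
        ((List.Perm.cons _ hperm).trans (List.perm_append_singleton _ _).symm)
    · by_cases h2 : q.getD 0 0 = 2
      · rw [if_neg h1, if_pos h2, if_neg h1, if_pos h2]
        rw [if_neg h1, if_pos h2, Bool.and_eq_true] at hpre
        obtain ⟨-, hpre⟩ := hpre
        refine IH heap values _ (delL ++ [q.getD 1 0]) popped res hord hperm ?_ ?_ hpre
        · intro x hx
          rw [PySem.Set.mem_add]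
          exact Or.inl (hpop x hx)
        · intro x
          rw [List.mem_append, PySem.Set.mem_add, List.mem_singleton, hdel x]
      · by_cases h3 : q.getD 0 0 = 3
        · rw [if_neg h1, if_neg h2, if_pos h3, if_neg h1, if_neg h2, if_pos h3]
          rw [if_neg h1, if_neg h2, if_pos h3, Bool.and_eq_true] at hpre
          obtain ⟨hany, hpre⟩ := hpre
          obtain ⟨v, hvval, hvdel'⟩ : ∃ v ∈ values, v ∉ del := by
            rw [List.any_eq_true] at hany
            obtain ⟨v, hv, hvb⟩ := hany
            have hnl : v ∉ delL := by simpa using hvb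
            rw [hdel v] at hnl
            exact ⟨v, hv, hnl⟩
          have hvheap : v ∈ heap := by
            rcases List.mem_append.mp (hperm.mem_iff.mpr hvval) with h | h
            · exact h
            · exact absurd (hpop v h) hvdel'
          obtain ⟨M1, M2, M3, M4, pp, M5, M6⟩ :=
            pv_getMinLoop_spec heap.length heap del le_rfl hord ⟨v, hvheap, hvdel'⟩
          set m := (pvGetMinLoop heap.length heap del).1 with hm
          set cands := values.filter (fun v => !(PySem.Set.contains del v)) with hcands
          have hmem_heap : ∀ x ∈ cands, x ∈ heap ∧ x ∉ del := by
            intro x hx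
            rw [hcands, List.mem_filter] at hx
            obtain ⟨hxv, hxb⟩ := hx
            have hxdel : x ∉ del := by
              intro hc
              rw [(PySem.Set.contains_iff del x).mpr hc] at hxb
              simp at hxb
            refine ⟨?_, hxdel⟩
            rcases List.mem_append.mp (hperm.mem_iff.mpr hxv) with h | h
            · exact h
            · exact absurd (hpop x h) hxdel
          have hmc : m ∈ cands := by
            rw [hcands, List.mem_filter]
            have hcm : PySem.Set.contains del m = false := by
              cases hc : PySem.Set.contains del m
              · rfl
              · exact absurd ((PySem.Set.contains_iff del m).mp hc) M2
            refine ⟨hperm.mem_iff.mp (List.mem_append_left popped M1), by rw [hcm]; rfl⟩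
          have hminc : ∀ x ∈ cands, m ≤ x := by
            intro x hx
            obtain ⟨hxh, hxd⟩ := hmem_heap x hx
            exact M3 x hxh hxd
          set srt := PySem.List.sorted cands (fun v => v) false with hsrt
          have hmsrt : m ∈ srt := by rw [hsrt, PySem.List.mem_sorted]; exact hmc
          obtain ⟨s0, st, hs⟩ : ∃ s0 st, srt = s0 :: st := by
            cases hsr : srt with
            | nil => rw [hsr] at hmsrt; simp at hmsrt
            | cons a b => exact ⟨a, b, rfl⟩
          have hs0c : s0 ∈ cands := by
            have hmem : s0 ∈ srt := by rw [hs]; exact List.mem_cons_self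
            rwa [hsrt, PySem.List.mem_sorted] at hmem
          have hsrteq : PySem.List.sorted cands (fun v => v) false = s0 :: st := by
            rw [← hsrt]; exact hs
          have h1le : s0 ≤ m := PySem.List.key_head_sorted_le cands (fun v => v) hsrteq m hmc
          have heq : m = s0 := le_antisymm (hminc s0 hs0c) h1le
          have hgetD : srt.getD 0 0 = m := by rw [hs, heq]; rfl
          rw [hgetD]
          refine IH _ _ _ delL (pp ++ popped) _ M4 ?_ ?_ hdel hpre
          · rw [← List.append_assoc]
            exact (M5.append_right popped).trans hperm
          · intro x hx
            rcases List.mem_append.mp hx with h | h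
            · exact M6 x h
            · exact hpop x h
        · rw [if_neg h1, if_neg h2, if_neg h3, if_neg h1, if_neg h2, if_neg h3]
          rw [if_neg h1, if_neg h2, if_neg h3] at hpre
          exact IH heap values del delL popped res hord hperm hpop hdel hpre

-- ===== VERDICT (by name: the statement is the Claim_ definition above) =====
theorem heap_operations_spec : Claim_equal_heap_operations := by
  intro queries _hdom hpre
  unfold Spec_heap_operations heap_operations heap_operations_alt
  exact pv_go_eq queries [] [] PySem.Set.empty [] [] []
    (fun i hi h1 => by simp at hi) (by simp) (by simp) (by simp) hpre
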